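-- pv_equiv track=rewrite | github.com/JKHira/sdsl2_coder | L2_builder/token_registry_gen.py | _build_registry_entries
-- ===== SOURCE A (Python) =====
-- def _build_registry_entries(
--     used_tokens: set[str],
--     mapping: dict[str, str],
--     allow_unresolved: bool,
-- ) -> list[dict[str, str]]:
--     entries: list[dict[str, str]] = []
--     tokens = set(mapping.keys())
--     tokens.update(used_tokens)
--     for token in sorted(tokens):
--         target = mapping.get(token)
--         if target is None:
--             if not allow_unresolved and token in used_tokens:
--                 raise ValueError("E_REGISTRY_GEN_MAPPING_REQUIRED")
--             target = "UNRESOLVED#/"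
--         entries.append({"token": token, "target": target})
--     return entries
-- ===== SOURCE B (Python) =====
-- def _build_registry_entries(
--     used_tokens: set[str],
--     mapping: dict[str, str],
--     allow_unresolved: bool,
-- ) -> list[dict[str, str]]:
--     # Two-pointer merge of the two sorted streams (mapped keys / used tokens),
--     # instead of sorting the union set and looking each token up again.
--     ks = sorted(mapping)
--     us = sorted(used_tokens)
--     entries: list[dict[str, str]] = []
--     i = j = 0
--     while i < len(ks) or j < len(us):
--         if j >= len(us) or (i < len(ks) and ks[i] <= us[j]):
--             t = ks[i]
--             i += 1
--             if j < len(us) and us[j] == t: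
--                 j += 1
--             entries.append({"token": t, "target": mapping[t]})
--         else:
--             if not allow_unresolved:
--                 raise ValueError("E_REGISTRY_GEN_MAPPING_REQUIRED")
--             entries.append({"token": us[j], "target": "UNRESOLVED#/"})
--             j += 1
--     return entries
-- ===== Notes on version B (the rewrite author's own statement) =====
-- stated objective: alternative
-- what changed: Replaces A's build-a-union-set-then-sort-then-look-each-token-up loop by a two-pointer merge of the two independently sorted streams (mapping keys and used tokens), emitting entries and detecting unmapped used tokens during the merge itself, so no union set and no per-token dict.get on the union is ever built.
import Mathlib
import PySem

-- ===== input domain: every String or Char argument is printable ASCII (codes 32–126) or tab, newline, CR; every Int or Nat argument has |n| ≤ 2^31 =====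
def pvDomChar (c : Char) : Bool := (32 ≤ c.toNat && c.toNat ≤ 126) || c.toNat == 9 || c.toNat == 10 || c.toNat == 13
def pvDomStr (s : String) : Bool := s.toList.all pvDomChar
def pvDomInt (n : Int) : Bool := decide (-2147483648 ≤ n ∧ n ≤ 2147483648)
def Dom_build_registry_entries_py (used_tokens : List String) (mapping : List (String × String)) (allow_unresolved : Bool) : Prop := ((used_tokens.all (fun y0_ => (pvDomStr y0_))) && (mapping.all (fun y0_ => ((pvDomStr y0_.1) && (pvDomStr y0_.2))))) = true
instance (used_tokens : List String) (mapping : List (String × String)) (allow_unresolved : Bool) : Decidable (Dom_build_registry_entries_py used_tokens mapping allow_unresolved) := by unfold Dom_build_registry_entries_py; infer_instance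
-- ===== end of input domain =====

-- B replaces A's union-set + sort + per-token lookup loop by a two-pointer merge of the two
-- independently sorted streams (mapping keys / used tokens); objective: alternative algorithm, same cost.
-- In both ports the Python ValueError is modelled by Option/none; the final '.getD []' only makes the
-- signature total — Pre_ excludes exactly the raising inputs.

-- ===== PORT A =====
-- the 'for token in sorted(tokens): …' loop of A; none = the raise
def pvALoop (d : PySem.Dict String String) (used_tokens : List String) (allow_unresolved : Bool) :
    List String → Option (List (List (String × String)))
  | [] => some []
  | token :: rest =>
    match PySem.Dict.get? d token with
    | some target =>
        (pvALoop d used_tokens allow_unresolved rest).map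
          (fun entries => [("token", token), ("target", target)] :: entries)
    | none =>
        if !allow_unresolved && used_tokens.contains token then
          none
        else
          (pvALoop d used_tokens allow_unresolved rest).map
            (fun entries => [("token", token), ("target", "UNRESOLVED#/")] :: entries)

def build_registry_entries_py (used_tokens : List String) (mapping : List (String × String)) (allow_unresolved : Bool) : List (List (String × String)) :=
  let d := PySem.Dict.ofList mapping
  -- tokens = set(mapping.keys()); tokens.update(used_tokens); for token in sorted(tokens)
  let tokens := PySem.List.sorted (PySem.Set.update (PySem.Set.ofList (PySem.Dict.keys d)) used_tokens) (fun x => x) false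
  (pvALoop d used_tokens allow_unresolved tokens).getD []

-- ===== PORT B =====
-- the two-pointer 'while i < len(ks) or j < len(us)' merge of Source B; none = the raise.
-- 'mapping[t]' in the key branch always succeeds (t is a key); '(get? …).getD ""' only totalizes it.
def pvBMerge (d : PySem.Dict String String) (allow : Bool) :
    List String → List String → Option (List (List (String × String)))
  | [], [] => some []
  | k :: ks, [] =>
      (pvBMerge d allow ks []).map
        (fun es => [("token", k), ("target", (PySem.Dict.get? d k).getD "")] :: es)
  | [], u :: us =>
      if !allow then none
      else (pvBMerge d allow [] us).map
        (fun es => [("token", u), ("target", "UNRESOLVED#/")] :: es)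
  | k :: ks, u :: us =>
      if k ≤ u then
        (pvBMerge d allow ks (if u == k then us else u :: us)).map
          (fun es => [("token", k), ("target", (PySem.Dict.get? d k).getD "")] :: es)
      else
        if !allow then none
        else (pvBMerge d allow (k :: ks) us).map
          (fun es => [("token", u), ("target", "UNRESOLVED#/")] :: es)
termination_by ks us => ks.length + us.length
decreasing_by all_goals (simp only [List.length_cons]; try split) <;> (try simp only [List.length_cons]) <;> omega

def build_registry_entries_py_alt (used_tokens : List String) (mapping : List (String × String)) (allow_unresolved : Bool) : List (List (String × String)) :=
  let d := PySem.Dict.ofList mapping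
  -- ks = sorted(mapping); us = sorted(used_tokens)  (used_tokens is a Python set: Set.ofList is its list of distinct elements)
  let ks := PySem.List.sorted (PySem.Dict.keys d) (fun x => x) false
  let us := PySem.List.sorted (PySem.Set.ofList used_tokens) (fun x => x) false
  (pvBMerge d allow_unresolved ks us).getD []

-- ===== PRECONDITION & SPEC =====
-- Pre_ excludes exactly the inputs on which A raises ValueError("E_REGISTRY_GEN_MAPPING_REQUIRED"):
-- allow_unresolved is false and some used token is not a key of mapping (B raises there too).
def Pre_build_registry_entries_py (used_tokens : List String) (mapping : List (String × String)) (allow_unresolved : Bool) : Prop :=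
  allow_unresolved = true ∨ used_tokens.all (fun token => (PySem.Dict.ofList mapping).contains token) = true
instance (used_tokens : List String) (mapping : List (String × String)) (allow_unresolved : Bool) : Decidable (Pre_build_registry_entries_py used_tokens mapping allow_unresolved) := by unfold Pre_build_registry_entries_py; infer_instance
def pvWitness_build_registry_entries_py : List String × (List (String × String)) × Bool :=
  (["a", "c"], [("a", "x"), ("b", "y")], true)

def Spec_build_registry_entries_py (used_tokens : List String) (mapping : List (String × String)) (allow_unresolved : Bool) (out : List (List (String × String))) : Prop := out = build_registry_entries_py_alt used_tokens mapping allow_unresolved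
instance (used_tokens : List String) (mapping : List (String × String)) (allow_unresolved : Bool) (out : List (List (String × String))) : Decidable (Spec_build_registry_entries_py used_tokens mapping allow_unresolved out) := by unfold Spec_build_registry_entries_py; infer_instance

-- ===== CLAIM (what is proved, stated in full; the proofs are below) =====
def Claim_equal_build_registry_entries_py : Prop := ∀ (used_tokens : List String) (mapping : List (String × String)) (allow_unresolved : Bool), Dom_build_registry_entries_py used_tokens mapping allow_unresolved → Pre_build_registry_entries_py used_tokens mapping allow_unresolved → Spec_build_registry_entries_py used_tokens mapping allow_unresolved (build_registry_entries_py used_tokens mapping allow_unresolved)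

-- ===== LEMMAS AND PROOFS =====

-- proof-side skeleton of B's merge: the merged token sequence alone
def pvMergeT : List String → List String → List String
  | [], [] => []
  | k :: ks, [] => k :: pvMergeT ks []
  | [], u :: us => u :: pvMergeT [] us
  | k :: ks, u :: us =>
      if k ≤ u then k :: pvMergeT ks (if u == k then us else u :: us)
      else u :: pvMergeT (k :: ks) us
termination_by ks us => ks.length + us.length
decreasing_by all_goals (simp only [List.length_cons]; try split) <;> (try simp only [List.length_cons]) <;> omega

theorem mem_pvMergeT : ∀ ks us (x : String), x ∈ pvMergeT ks us ↔ x ∈ ks ∨ x ∈ us := by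
  intro ks us
  induction ks, us using pvMergeT.induct with
  | case4 k ks u us hle ih =>
      intro x; rw [pvMergeT, if_pos hle]
      by_cases h : u = k
      · subst h; simp at ih; simp [ih]; tauto
      · have hne : (u == k) = false := by simpa using h
        simp [hne] at ih
        rw [show (if u == k then us else u :: us) = u :: us from by simp [hne]]
        simp [ih]; tauto
  | case5 k ks u us hle ih => intro x; rw [pvMergeT, if_neg hle]; simp [ih]; tauto
  | _ => intro x; rw [pvMergeT]; simp_all

theorem pairwise_pvMergeT : ∀ ks us : List String, ks.Pairwise (· < ·) → us.Pairwise (· < ·) →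
    (pvMergeT ks us).Pairwise (· < ·) := by
  intro ks us
  induction ks, us using pvMergeT.induct with
  | case1 => intro _ _; simp [pvMergeT]
  | case2 k ks ih =>
      intro hk _; rw [pvMergeT]
      rcases hk with _ | ⟨hk1, hk2⟩
      refine List.Pairwise.cons ?_ (ih hk2 (List.Pairwise.nil))
      intro x hx; rcases (mem_pvMergeT _ _ x).1 hx with h | h
      · exact hk1 x h
      · simp at h
  | case3 u us ih =>
      intro _ hu; rw [pvMergeT]
      rcases hu with _ | ⟨hu1, hu2⟩
      refine List.Pairwise.cons ?_ (ih (List.Pairwise.nil) hu2)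
      intro x hx; rcases (mem_pvMergeT _ _ x).1 hx with h | h
      · simp at h
      · exact hu1 x h
  | case4 k ks u us hle ih =>
      intro hk hu; rw [pvMergeT, if_pos hle]
      rcases hk with _ | ⟨hk1, hk2⟩
      rcases hu with _ | ⟨hu1, hu2⟩
      by_cases h : u = k
      · subst h
        simp only [beq_self_eq_true] at ih ⊢
        refine List.Pairwise.cons ?_ (by simpa using ih hk2 hu2)
        intro x hx
        rcases (mem_pvMergeT _ _ x).1 (by simpa using hx) with hm | hm
        · exact hk1 x hm
        · exact hu1 x hm
      · have hne : (u == k) = false := by simpa using h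
        have hlt : k < u := lt_of_le_of_ne hle (fun e => h e.symm)
        simp only [hne] at ih ⊢
        refine List.Pairwise.cons ?_ (by simpa using ih hk2 (List.Pairwise.cons hu1 hu2))
        intro x hx
        rcases (mem_pvMergeT _ _ x).1 (by simpa using hx) with hm | hm
        · exact hk1 x hm
        · rcases List.mem_cons.1 hm with rfl | hm
          · exact hlt
          · exact lt_trans hlt (hu1 x hm)
  | case5 k ks u us hle ih =>
      intro hk hu; rw [pvMergeT, if_neg hle]
      have hlt : u < k := lt_of_not_ge hle
      rcases hu with _ | ⟨hu1, hu2⟩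
      refine List.Pairwise.cons ?_ (ih hk hu2)
      intro x hx
      rcases (mem_pvMergeT _ _ x).1 hx with hm | hm
      · rcases List.mem_cons.1 hm with rfl | hm
        · exact hlt
        · exact lt_trans hlt ((List.pairwise_cons.1 hk).1 x hm)
      · exact hu1 x hm

-- B's merge, under the sortedness and no-raise hypotheses, is (some of) the canonical entry map
theorem pvBMerge_eq (d : PySem.Dict String String) (allow : Bool) :
    ∀ ks us : List String, ks.Pairwise (· < ·) → us.Pairwise (· < ·) →
    (∀ k ∈ ks, (PySem.Dict.get? d k).isSome = true) →
    (∀ u ∈ us, (PySem.Dict.get? d u).isSome = true → u ∈ ks) →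
    (allow = true ∨ ∀ u ∈ us, (PySem.Dict.get? d u).isSome = true) →
    pvBMerge d allow ks us =
      some ((pvMergeT ks us).map
        (fun t => [("token", t), ("target", PySem.Dict.getD d t "UNRESOLVED#/")])) := by
  intro ks us
  induction ks, us using pvMergeT.induct with
  | case1 => intro _ _ _ _ _; rw [pvBMerge, pvMergeT]; simp
  | case2 k ks ih =>
      intro hk _ hK hU hP
      rw [pvBMerge, pvMergeT,
        ih (List.pairwise_cons.1 hk).2 List.Pairwise.nil
          (fun x hx => hK x (List.mem_cons_of_mem _ hx)) (by simp) hP]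
      obtain ⟨v, hv⟩ := Option.isSome_iff_exists.1 (hK k (List.mem_cons_self ..))
      simp [PySem.Dict.getD_eq_get?_getD, hv]
  | case3 u us ih =>
      intro _ hu hK hU hP
      have hnone : PySem.Dict.get? d u = none := by
        cases hg : PySem.Dict.get? d u with
        | none => rfl
        | some v => exact absurd (hU u (List.mem_cons_self ..) (by simp [hg])) (by simp)
      have hallow : allow = true := by
        rcases hP with h | h
        · exact h
        · exact absurd (h u (List.mem_cons_self ..)) (by simp [hnone])
      subst hallow
      rw [pvBMerge, pvMergeT]
      simp only [Bool.not_true, Bool.false_eq_true, if_false]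
      rw [ih List.Pairwise.nil (List.pairwise_cons.1 hu).2 hK
        (fun x hx hs => hU x (List.mem_cons_of_mem _ hx) hs) (Or.inl rfl)]
      simp [PySem.Dict.getD_eq_get?_getD, hnone]
  | case4 k ks u us hle ih =>
      intro hk hu hK hU hP
      obtain ⟨v, hv⟩ := Option.isSome_iff_exists.1 (hK k (List.mem_cons_self ..))
      by_cases h : u = k
      · subst h
        simp only [beq_self_eq_true, dite_true] at ih
        rw [pvBMerge, if_pos hle]
        simp only [beq_self_eq_true, if_true]
        rw [ih (List.pairwise_cons.1 hk).2 (List.pairwise_cons.1 hu).2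
            (fun x hx => hK x (List.mem_cons_of_mem _ hx))
            (fun x hx hs => by
              rcases List.mem_cons.1 (hU x (List.mem_cons_of_mem _ hx) hs) with rfl | hm
              · exact absurd ((List.pairwise_cons.1 hu).1 x hx) (lt_irrefl x)
              · exact hm)
            (hP.imp id (fun h x hx => h x (List.mem_cons_of_mem _ hx)))]
        rw [pvMergeT, if_pos hle]
        simp only [beq_self_eq_true, if_true]
        simp [PySem.Dict.getD_eq_get?_getD, hv]
      · have hne : (u == k) = false := by simpa using h
        have hlt : k < u := lt_of_le_of_ne hle (fun e => h e.symm)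
        simp only [hne, Bool.false_eq_true, dite_false] at ih
        rw [pvBMerge, if_pos hle]
        simp only [hne, Bool.false_eq_true, if_false]
        rw [ih (List.pairwise_cons.1 hk).2 hu
            (fun x hx => hK x (List.mem_cons_of_mem _ hx))
            (fun x hx hs => by
              rcases List.mem_cons.1 (hU x hx hs) with rfl | hm
              · rcases List.mem_cons.1 hx with rfl | hm2
                · exact absurd rfl h
                · exact absurd (lt_trans hlt ((List.pairwise_cons.1 hu).1 x hm2)) (lt_irrefl x)
              · exact hm)
            hP]
        rw [pvMergeT, if_pos hle]
        simp only [hne, Bool.false_eq_true, if_false]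
        simp [PySem.Dict.getD_eq_get?_getD, hv]
  | case5 k ks u us hle ih =>
      intro hk hu hK hU hP
      have hlt : u < k := lt_of_not_ge hle
      have hnotmem : u ∉ k :: ks := by
        intro hm
        rcases List.mem_cons.1 hm with rfl | hm
        · exact lt_irrefl u hlt
        · exact absurd (lt_trans hlt ((List.pairwise_cons.1 hk).1 u hm)) (lt_irrefl u)
      have hnone : PySem.Dict.get? d u = none := by
        cases hg : PySem.Dict.get? d u with
        | none => rfl
        | some v => exact absurd (hU u (List.mem_cons_self ..) (by simp [hg])) hnotmem
      have hallow : allow = true := by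
        rcases hP with h | h
        · exact h
        · exact absurd (h u (List.mem_cons_self ..)) (by simp [hnone])
      subst hallow
      rw [pvBMerge, if_neg hle]
      simp only [Bool.not_true, Bool.false_eq_true, if_false]
      rw [ih hk (List.pairwise_cons.1 hu).2 hK
          (fun x hx hs => hU x (List.mem_cons_of_mem _ hx) hs) (Or.inl rfl)]
      rw [pvMergeT, if_neg hle]
      simp [PySem.Dict.getD_eq_get?_getD, hnone]

-- A's loop under the no-raise hypothesis returns (some) of exactly the canonical entry map
theorem pvALoop_eq_map (d : PySem.Dict String String) (used_tokens : List String) (allow_unresolved : Bool)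
    (H : ∀ t, PySem.Dict.get? d t = none → (!allow_unresolved && used_tokens.contains t) = false) :
    ∀ toks : List String, pvALoop d used_tokens allow_unresolved toks =
      some (toks.map (fun token => [("token", token), ("target", PySem.Dict.getD d token "UNRESOLVED#/")])) := by
  intro toks
  induction toks with
  | nil => rfl
  | cons t rest ih =>
    rw [pvALoop]
    cases h : PySem.Dict.get? d t with
    | some target =>
      simp [ih, PySem.Dict.getD_eq_get?_getD, h]
    | none =>
      rw [H t h]
      simp [ih, PySem.Dict.getD_eq_get?_getD, h]

-- ===== VERDICT (by name: the statement is the Claim_ definition above) =====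
theorem build_registry_entries_py_spec : Claim_equal_build_registry_entries_py := by
  intro used_tokens mapping allow_unresolved _hdom hpre
  unfold Spec_build_registry_entries_py build_registry_entries_py build_registry_entries_py_alt
  set d := PySem.Dict.ofList mapping with hd
  have hnodk : d.keys.Nodup := PySem.Dict.nodup_keys_ofList mapping
  have hkeq : PySem.Set.ofList (PySem.Dict.keys d) = PySem.Dict.keys d :=
    PySem.Set.ofList_eq_self_of_nodup _ hnodk
  have hks : (PySem.List.sorted (PySem.Dict.keys d) (fun x => x) false).Pairwise (· < ·) := by
    rw [← hkeq]; exact PySem.List.sorted_ofList_pairwise_lt ..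
  have hus : (PySem.List.sorted (PySem.Set.ofList used_tokens) (fun x => x) false).Pairwise (· < ·) :=
    PySem.List.sorted_ofList_pairwise_lt ..
  have hmemks : ∀ x, x ∈ PySem.List.sorted (PySem.Dict.keys d) (fun x => x) false ↔ x ∈ PySem.Dict.keys d := by
    intro x; exact PySem.List.mem_sorted ..
  have hmemus : ∀ x, x ∈ PySem.List.sorted (PySem.Set.ofList used_tokens) (fun x => x) false ↔ x ∈ used_tokens := by
    intro x; rw [PySem.List.mem_sorted]; exact PySem.Set.mem_ofList ..
  have hK : ∀ k ∈ PySem.List.sorted (PySem.Dict.keys d) (fun x => x) false,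
      (PySem.Dict.get? d k).isSome = true := by
    intro k hk
    rw [← PySem.Dict.contains_eq_isSome_get?]
    exact (PySem.Dict.contains_iff_mem_keys ..).2 ((hmemks k).1 hk)
  have hU : ∀ u ∈ PySem.List.sorted (PySem.Set.ofList used_tokens) (fun x => x) false,
      (PySem.Dict.get? d u).isSome = true → u ∈ PySem.List.sorted (PySem.Dict.keys d) (fun x => x) false := by
    intro u _ hs
    exact (hmemks u).2 ((PySem.Dict.contains_iff_mem_keys ..).1
      (by rw [PySem.Dict.contains_eq_isSome_get?]; exact hs))
  have hP : allow_unresolved = true ∨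
      ∀ u ∈ PySem.List.sorted (PySem.Set.ofList used_tokens) (fun x => x) false,
        (PySem.Dict.get? d u).isSome = true := by
    rcases hpre with hal | hall
    · exact Or.inl hal
    · refine Or.inr (fun u hu => ?_)
      rw [List.all_eq_true] at hall
      rw [← PySem.Dict.contains_eq_isSome_get?]
      exact hall u ((hmemus u).1 hu)
  have H : ∀ t, PySem.Dict.get? d t = none →
      (!allow_unresolved && used_tokens.contains t) = false := by
    intro t ht
    rcases hpre with hal | hall
    · simp [hal]
    · cases hu : used_tokens.contains t with
      | false => simp only [Bool.and_false]
      | true =>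
        exfalso
        have hc : d.contains t = true := by
          rw [List.all_eq_true] at hall
          exact hall t (by simpa using hu)
        rw [PySem.Dict.contains_eq_isSome_get?, ht] at hc
        simp at hc
  have hB := pvBMerge_eq d allow_unresolved
    (PySem.List.sorted (PySem.Dict.keys d) (fun x => x) false)
    (PySem.List.sorted (PySem.Set.ofList used_tokens) (fun x => x) false)
    hks hus hK hU hP
  have hA := pvALoop_eq_map d used_tokens allow_unresolved H
    (PySem.List.sorted (PySem.Set.update (PySem.Set.ofList (PySem.Dict.keys d)) used_tokens) (fun x => x) false)
  -- the two token sequences coincide: both are the strictly increasing list of keys(d) ∪ used_tokens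
  have hmerge := pairwise_pvMergeT _ _ hks hus
  have hperm : (pvMergeT (PySem.List.sorted (PySem.Dict.keys d) (fun x => x) false)
      (PySem.List.sorted (PySem.Set.ofList used_tokens) (fun x => x) false)).Perm
      (PySem.Set.update (PySem.Set.ofList (PySem.Dict.keys d)) used_tokens) := by
    rw [List.perm_ext_iff_of_nodup
      (hmerge.imp (fun hlt => ne_of_lt hlt))
      (PySem.Set.nodup_update _ _ (PySem.Set.nodup_ofList _))]
    intro a
    rw [mem_pvMergeT, PySem.Set.mem_update, PySem.Set.mem_ofList, hmemks a, hmemus a]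
  have htok : PySem.List.sorted (PySem.Set.update (PySem.Set.ofList (PySem.Dict.keys d)) used_tokens) (fun x => x) false
      = pvMergeT (PySem.List.sorted (PySem.Dict.keys d) (fun x => x) false)
        (PySem.List.sorted (PySem.Set.ofList used_tokens) (fun x => x) false) :=
    PySem.List.sorted_eq_of_perm_of_pairwise_lt _ _ _ hperm hmerge
  simp only [hB, htok]
  rw [htok] at hA
  rw [hA]
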